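-- pv_equiv track=rewrite | github.com/SivanBitan/LexicographicalTreeOrdering | main.py | zaks_isFeasible_z
-- ===== SOURCE A (Python) =====
-- def zaks_isFeasible_z(z, n):
--     if (len(z) != n):
--         return False
--     j = 0
--     cnt = 0
--     for i in range(0, 2 * n):
--         if (j < n and z[j] == (i + 1)):
--             cnt += 1
--             j += 1
--         else:
--             cnt -= 1
--         if (cnt < 0):
--             return False
--     return True
-- ===== SOURCE B (Python) =====
-- def zaks_isFeasible_z(z, n):
--     # Walk over the n opening positions instead of the 2n time steps.
--     if len(z) != n:
--         return False
--     prev = 0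
--     cnt = 0
--     for x in z:
--         if not (prev < x and x <= 2 * n):
--             return False
--         cnt -= x - prev - 1
--         if cnt < 0:
--             return False
--         cnt += 1
--         prev = x
--     return cnt - (2 * n - prev) >= 0
-- ===== Notes on version B (the rewrite author's own statement) =====
-- stated objective: alternative
-- what changed: B iterates over the n opening positions themselves (prev/cnt walk that subtracts each gap of closing steps in one arithmetic operation) instead of simulating all 2n time steps with a pointer j into z.
import Mathlib
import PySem

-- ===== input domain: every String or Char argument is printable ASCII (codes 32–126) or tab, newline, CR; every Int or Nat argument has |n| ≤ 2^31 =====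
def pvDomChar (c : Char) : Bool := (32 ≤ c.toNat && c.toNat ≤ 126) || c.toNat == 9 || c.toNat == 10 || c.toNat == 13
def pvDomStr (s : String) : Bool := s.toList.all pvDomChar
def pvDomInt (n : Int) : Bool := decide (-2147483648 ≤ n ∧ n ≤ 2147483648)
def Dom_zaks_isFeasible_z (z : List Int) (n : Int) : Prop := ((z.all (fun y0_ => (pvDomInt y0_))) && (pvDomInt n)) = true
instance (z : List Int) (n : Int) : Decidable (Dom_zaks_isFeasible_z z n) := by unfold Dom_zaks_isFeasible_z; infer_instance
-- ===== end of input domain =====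

-- B replaces A's simulation of all 2n time steps by a walk over the n opening
-- positions themselves, subtracting each gap of closing steps in one arithmetic step.

-- ===== PORT A =====
-- the for-loop over range(0, 2*n) with early returns, state (j, cnt)
def zaksLoopA (z : List Int) (n : Int) : List Int → Int → Int → Bool
  | [], _, _ => true
  | i :: rest, j, cnt =>
    if j < n ∧ PySem.List.pyGet? z j = some (i + 1) then
      if cnt + 1 < 0 then false else zaksLoopA z n rest (j + 1) (cnt + 1)
    else
      if cnt - 1 < 0 then false else zaksLoopA z n rest j (cnt - 1)

def zaks_isFeasible_z (z : List Int) (n : Int) : Bool :=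
  if (z.length : Int) ≠ n then false
  else zaksLoopA z n (PySem.List.pyRange 0 (2 * n) 1) 0 0

-- ===== PORT B =====
-- the for-loop over the elements of z, state (prev, cnt), with early returns
def zaksLoopB (n : Int) : List Int → Int → Int → Bool
  | [], prev, cnt => decide (0 ≤ cnt - (2 * n - prev))
  | x :: rest, prev, cnt =>
    if ¬ (prev < x ∧ x ≤ 2 * n) then false
    else
      let cnt' := cnt - (x - prev - 1)
      if cnt' < 0 then false else zaksLoopB n rest x (cnt' + 1)

def zaks_isFeasible_z_alt (z : List Int) (n : Int) : Bool :=
  if (z.length : Int) ≠ n then false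
  else zaksLoopB n z 0 0

-- ===== PRECONDITION & SPEC =====
def Spec_zaks_isFeasible_z (z : List Int) (n : Int) (out : Bool) : Prop := out = zaks_isFeasible_z_alt z n
instance (z : List Int) (n : Int) (out : Bool) : Decidable (Spec_zaks_isFeasible_z z n out) := by unfold Spec_zaks_isFeasible_z; infer_instance

-- ===== CLAIM (what is proved, stated in full; the proofs are below) =====
def Claim_equal_zaks_isFeasible_z : Prop := ∀ (z : List Int) (n : Int), Dom_zaks_isFeasible_z z n → Spec_zaks_isFeasible_z z n (zaks_isFeasible_z z n)

-- ===== LEMMAS AND PROOFS =====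

-- proof-side restatement of A's loop: instead of the index j into z, carry the
-- remaining suffix of z directly
def zaksLoopA' (n : Int) : List Int → List Int → Int → Bool
  | [], _, _ => true
  | i :: rest, zs, cnt =>
    match zs with
    | [] => if cnt - 1 < 0 then false else zaksLoopA' n rest [] (cnt - 1)
    | x :: zs' =>
      if x = i + 1 then
        if cnt + 1 < 0 then false else zaksLoopA' n rest zs' (cnt + 1)
      else
        if cnt - 1 < 0 then false else zaksLoopA' n rest (x :: zs') (cnt - 1)

theorem zaksLoopA_eq_A' (z : List Int) (n : Int) (hlen : (z.length : Int) = n) :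
    ∀ (rng : List Int) (j cnt : Int), 0 ≤ j → j ≤ n →
      zaksLoopA z n rng j cnt = zaksLoopA' n rng (z.drop j.toNat) cnt := by
  intro rng
  induction rng with
  | nil => intro j cnt _ _; rfl
  | cons i rest ih =>
    intro j cnt hj0 hjn
    by_cases hjlt : j < n
    · have hjlen : j.toNat < z.length := by omega
      have hget : PySem.List.pyGet? z j = some z[j.toNat] :=
        PySem.List.pyGet?_eq_some_getElem z hj0 (by omega)
      have hdrop : z.drop j.toNat = z[j.toNat] :: z.drop (j.toNat + 1) :=
        List.drop_eq_getElem_cons hjlen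
      rw [hdrop]
      simp only [zaksLoopA, zaksLoopA']
      by_cases hx : z[j.toNat] = i + 1
      · rw [if_pos ⟨hjlt, by rw [hget, hx]⟩, if_pos hx]
        split_ifs with h
        · rfl
        · rw [ih (j + 1) (cnt + 1) (by omega) (by omega)]
          have hj1 : (j + 1).toNat = j.toNat + 1 := by omega
          rw [hj1]
      · have hcond : ¬ (j < n ∧ PySem.List.pyGet? z j = some (i + 1)) := by
          rw [hget]; rintro ⟨_, h2⟩
          exact hx (Option.some_injective _ h2)
        rw [if_neg hcond, if_neg hx]
        split_ifs with h
        · rfl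
        · rw [ih j (cnt - 1) hj0 hjn, hdrop]
    · have hdrop : z.drop j.toNat = [] := by
        apply List.drop_eq_nil_of_le; omega
      rw [hdrop]
      simp only [zaksLoopA, zaksLoopA']
      have hcond : ¬ (j < n ∧ PySem.List.pyGet? z j = some (i + 1)) := by
        rintro ⟨h1, _⟩; exact hjlt h1
      rw [if_neg hcond]
      split_ifs with h
      · rfl
      · rw [ih j (cnt - 1) hj0 hjn, hdrop]

-- main invariant lemma: A's per-time-step drain equals B's per-element walk.
-- state: i time steps done, zs the unmatched suffix, cnt = 2*(matched) - i ≥ 0.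
theorem loopA'_eq_loopB (n : Int) :
    ∀ (k : ℕ) (i : Int) (zs : List Int) (cnt : Int),
      0 ≤ i → i + k = 2 * n → cnt = 2 * ((n - (zs.length : Int)) ) - i → 0 ≤ cnt →
      zaksLoopA' n (PySem.List.pyRange i (2 * n) 1) zs cnt = zaksLoopB n zs i cnt := by
  intro k
  induction k with
  | zero =>
    intro i zs cnt hi0 hik hinv hcnt
    have hi : i = 2 * n := by omega
    have hzs : zs = [] := by
      cases zs with
      | nil => rfl
      | cons x xs => exfalso; simp at hinv; omega
    subst hzs
    rw [PySem.List.pyRange_one_eq_nil (by omega)]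
    simp only [zaksLoopA', zaksLoopB]
    simp at hinv
    have : cnt - (2 * n - i) = 0 := by omega
    simp [this]
  | succ k ih =>
    intro i zs cnt hi0 hik hinv hcnt
    have hilt : i < 2 * n := by omega
    rw [PySem.List.pyRange_one_cons (by omega)]
    cases zs with
    | nil =>
      -- drain: cnt = 2n - i ≥ 1
      simp only [List.length_nil, Int.ofNat_zero] at hinv
      have hcnt' : cnt = 2 * n - i := by omega
      simp only [zaksLoopA']
      rw [if_neg (by omega)]
      rw [ih (i + 1) [] (cnt - 1) (by omega) (by omega) (by simp; omega) (by omega)]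
      simp only [zaksLoopB]
      have h1 : cnt - 1 - (2 * n - (i + 1)) = cnt - (2 * n - i) := by ring
      rw [h1]
    | cons x zs' =>
      simp only [List.length_cons] at hinv
      have hL : (0:Int) ≤ (zs'.length : Int) := by positivity
      simp only [zaksLoopA', zaksLoopB]
      by_cases hx : x = i + 1
      · rw [if_pos hx, if_neg (by omega)]
        rw [ih (i + 1) zs' (cnt + 1) (by omega) (by omega) (by push_cast at hinv ⊢; omega) (by omega)]
        have hguard : ¬ ¬ (i < x ∧ x ≤ 2 * n) := by omega
        rw [if_neg hguard]
        have h2 : cnt - (x - i - 1) = cnt := by omega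
        simp only [h2]
        rw [if_neg (by omega)]
        subst hx; rfl
      · rw [if_neg hx]
        by_cases hdead : cnt - 1 < 0
        · -- cnt = 0; B must also reject
          rw [if_pos hdead]
          have hc0 : cnt = 0 := by omega
          by_cases hg : ¬ (i < x ∧ x ≤ 2 * n)
          · rw [if_pos hg]
          · rw [if_neg hg]
            rw [not_not] at hg
            have hx2 : i + 2 ≤ x := by omega
            rw [if_pos (by omega)]
        · rw [if_neg hdead]
          rw [ih (i + 1) (x :: zs') (cnt - 1) (by omega) (by omega)
              (by simp only [List.length_cons]; push_cast; push_cast at hinv; omega) (by omega)]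
          -- B at prev = i+1, cnt-1 equals B at prev = i, cnt (x ≠ i+1)
          simp only [zaksLoopB]
          by_cases hg : i < x ∧ x ≤ 2 * n
          · have hg' : i + 1 < x ∧ x ≤ 2 * n := by omega
            rw [if_neg (by omega : ¬ ¬ (i + 1 < x ∧ x ≤ 2 * n)),
                if_neg (by omega : ¬ ¬ (i < x ∧ x ≤ 2 * n))]
            have h3 : cnt - 1 - (x - (i + 1) - 1) = cnt - (x - i - 1) := by ring
            simp only [h3]
          · rw [if_pos (by omega : ¬ (i + 1 < x ∧ x ≤ 2 * n)),
                if_pos (by omega : ¬ (i < x ∧ x ≤ 2 * n))]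

-- ===== VERDICT (by name: the statement is the Claim_ definition above) =====
theorem zaks_isFeasible_z_spec : Claim_equal_zaks_isFeasible_z := by
  intro z n _
  unfold Spec_zaks_isFeasible_z zaks_isFeasible_z zaks_isFeasible_z_alt
  by_cases hlen : (z.length : Int) ≠ n
  · rw [if_pos hlen, if_pos hlen]
  · rw [if_neg hlen, if_neg hlen]
    rw [not_not] at hlen
    have h0n : 0 ≤ n := by omega
    rw [zaksLoopA_eq_A' z n hlen _ 0 0 le_rfl h0n]
    simp only [Int.toNat_zero, List.drop_zero]
    exact loopA'_eq_loopB n (2 * n).toNat 0 z 0 (le_refl 0) (by omega)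
      (by rw [← hlen]; ring) (le_refl 0)
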